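-- pv_equiv track=rewrite | github.com/hclent/BehaviorCheckingSemPar | src/utils/utils.py | restore_feature_case
-- ===== SOURCE A (Python) =====
-- def restore_feature_case(features, s):
--     tokens = []
--     i = 0
--     for feat in features:
--         if feat.endswith('##'):
--             feat_ = feat[:-2]
--         elif feat.startswith('##'):
--             feat_ = feat[2:]
--         else:
--             feat_ = feat
--         while not s[i].strip():
--             i += 1
--         token = s[i:i+len(feat_)]
--         i = i + len(feat_)
--         if feat.endswith('##'):
--             token += '##'
--         if feat.startswith('##'):
--             token = '##' + token
--         # assert(token.lower() == feat)
--         assert(len(token) == len(feat))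
--         tokens.append(token)
--     return tokens
-- ===== SOURCE B (Python) =====
-- def restore_feature_case(features, s):
--     recs = []
--     for f in features:
--         suf = f.endswith('##')
--         pre = f.startswith('##')
--         core = f[:-2] if suf else (f[2:] if pre else f)
--         recs.append((core, pre, suf, len(f)))
--     rest = s
--     tokens = []
--     for core, pre, suf, n in recs:
--         rest = rest.lstrip()
--         token = rest[:len(core)]
--         rest = rest[len(core):]
--         if suf:
--             token += '##'
--         if pre:
--             token = '##' + token
--         assert len(token) == n
--         tokens.append(token)
--     return tokens
-- ===== Notes on version B (the rewrite author's own statement) =====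
-- stated objective: alternative
-- what changed: B first parses each feature into a (core, has_prefix, has_suffix, length) record in one pass, then aligns by consuming a shrinking suffix of s via lstrip and slicing, instead of A's single pass that walks an integer index with a char-by-char whitespace while-loop.
import Mathlib
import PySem

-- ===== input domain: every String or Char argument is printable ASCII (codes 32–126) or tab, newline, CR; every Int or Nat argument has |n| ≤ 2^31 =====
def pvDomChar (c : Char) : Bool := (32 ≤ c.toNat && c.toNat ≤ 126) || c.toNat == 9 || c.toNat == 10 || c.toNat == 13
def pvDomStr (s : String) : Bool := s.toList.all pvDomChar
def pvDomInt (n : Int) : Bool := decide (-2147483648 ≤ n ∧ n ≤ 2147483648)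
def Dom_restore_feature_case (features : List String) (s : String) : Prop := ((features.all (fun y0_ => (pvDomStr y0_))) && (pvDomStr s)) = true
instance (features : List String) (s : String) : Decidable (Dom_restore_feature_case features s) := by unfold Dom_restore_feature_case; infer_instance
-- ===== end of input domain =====

-- B restructures A as a parse pass over the features (records) followed by an align pass that
-- consumes a shrinking suffix of s via lstrip/slicing instead of walking an integer index; same
-- return value, no speed claim.

-- ===== PORT A =====
-- `while not s[i].strip(): i += 1` : advance i past whitespace; none = IndexError (i ran off s).
def pvSkipA (cs : List Char) (i : Nat) : Option Nat :=
  if h : i < cs.length then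
    if PySem.Chars.isspace cs[i] then pvSkipA cs (i + 1) else some i
  else none
  termination_by cs.length - i

-- the per-feature loop of A over s.toList with the running index i; a raised
-- IndexError / AssertionError is modeled by returning [] (those inputs are outside Pre_).
def pvLoopA : List (List Char) → List Char → Nat → List (List Char)
  | [], _, _ => []
  | f :: fs, cs, i =>
    let f_ := if PySem.Chars.endswith f ['#','#'] then PySem.List.slice f none (some (-2))
              else if PySem.Chars.startswith f ['#','#'] then PySem.List.slice f (some 2) none
              else f
    match pvSkipA cs i with
    | none => []
    | some j =>
      let token := PySem.List.slice cs (some (j : Int)) (some ((j : Int) + f_.length))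
      let i' := j + f_.length
      let token := if PySem.Chars.endswith f ['#','#'] then token ++ ['#','#'] else token
      let token := if PySem.Chars.startswith f ['#','#'] then ['#','#'] ++ token else token
      if token.length = f.length then token :: pvLoopA fs cs i' else []

def restore_feature_case (features : List String) (s : String) : List String :=
  (pvLoopA (features.map String.toList) s.toList 0).map String.mk

-- ===== PORT B =====
-- parse pass: (core, startswith '##', endswith '##', len(feature))
def pvParseB (f : List Char) : List Char × Bool × Bool × Nat :=
  let suf := PySem.Chars.endswith f ['#','#']
  let pre := PySem.Chars.startswith f ['#','#']
  let core := if suf then PySem.List.slice f none (some (-2))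
              else if pre then PySem.List.slice f (some 2) none
              else f
  (core, pre, suf, f.length)

-- align pass: rest[:k] / rest[k:] with k = len(core) ≥ 0 are exactly take/drop.
def pvAlignB : List (List Char × Bool × Bool × Nat) → List Char → List (List Char)
  | [], _ => []
  | (core, pre, suf, n) :: rs, rest =>
    let rest := PySem.Chars.lstrip rest
    let token := rest.take core.length
    let rest' := rest.drop core.length
    let token := if suf then token ++ ['#','#'] else token
    let token := if pre then ['#','#'] ++ token else token
    if token.length = n then token :: pvAlignB rs rest' else []

def restore_feature_case_alt (features : List String) (s : String) : List String :=
  (pvAlignB ((features.map String.toList).map pvParseB) s.toList).map String.mk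

-- ===== PRECONDITION & SPEC =====
-- Pre_ holds exactly on the inputs where Python A returns normally: for each feature, after
-- skipping whitespace some character of s remains (else IndexError), and the rebuilt token's
-- length equals the feature's length (else AssertionError). The alignment position depends on
-- the whitespace of s, so the condition is necessarily recursive over the input, but it checks
-- only lengths and shape and computes no output of either program.
def pvPreGo : List (List Char) → List Char → Bool
  | [], _ => true
  | f :: fs, cs =>
    let suf := PySem.Chars.endswith f ['#','#']
    let pre := PySem.Chars.startswith f ['#','#']
    let coreLen := if suf then f.length - 2 else if pre then f.length - 2 else f.length
    let cs' := cs.dropWhile PySem.Chars.isspace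
    !cs'.isEmpty &&
      (min coreLen cs'.length + (if suf then 2 else 0) + (if pre then 2 else 0) == f.length) &&
      pvPreGo fs (cs'.drop coreLen)

def Pre_restore_feature_case (features : List String) (s : String) : Prop :=
  pvPreGo (features.map String.toList) s.toList = true
instance (features : List String) (s : String) : Decidable (Pre_restore_feature_case features s) := by
  unfold Pre_restore_feature_case; infer_instance

def pvWitness_restore_feature_case : List String × String := (["The", "##re", "fo##"], "  There Fox")

def Spec_restore_feature_case (features : List String) (s : String) (out : List String) : Prop := out = restore_feature_case_alt features s
instance (features : List String) (s : String) (out : List String) : Decidable (Spec_restore_feature_case features s out) := by unfold Spec_restore_feature_case; infer_instance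

-- ===== CLAIM (what is proved, stated in full; the proofs are below) =====
def Claim_equal_restore_feature_case : Prop := ∀ (features : List String) (s : String), Dom_restore_feature_case features s → Pre_restore_feature_case features s → Spec_restore_feature_case features s (restore_feature_case features s)

-- ===== LEMMAS AND PROOFS =====

-- A's whitespace skip succeeds iff a non-space char remains, and lands on the lstrip suffix.
theorem pvSkipA_spec (cs : List Char) (i : Nat)
    (hne : (cs.drop i).dropWhile PySem.Chars.isspace ≠ []) :
    ∃ j, pvSkipA cs i = some j ∧ cs.drop j = (cs.drop i).dropWhile PySem.Chars.isspace := by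
  fun_induction pvSkipA cs i with
  | case1 i h hws ih =>
    rw [List.drop_eq_getElem_cons h, List.dropWhile_cons_of_pos hws] at hne ⊢
    exact ih (by simpa using hne)
  | case2 i h hws =>
    refine ⟨i, rfl, ?_⟩
    rw [List.drop_eq_getElem_cons h, List.dropWhile_cons_of_neg (by simpa using hws)]
  | case3 i h =>
    exfalso
    rw [List.drop_eq_nil_of_le (by omega)] at hne
    simp at hne

theorem pvSlice_neg2 {α : Type} (f : List α) :
    PySem.List.slice f none (some (-2)) = f.take (f.length - 2) := by
  simp [PySem.List.slice, PySem.List.clampIdx]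
  split_ifs <;> omega

theorem pvLoop_eq (fs : List (List Char)) (cs : List Char) (i : Nat)
    (h : pvPreGo fs (cs.drop i) = true) :
    pvLoopA fs cs i = pvAlignB (fs.map pvParseB) (cs.drop i) := by
  induction fs generalizing i with
  | nil => simp [pvLoopA, pvAlignB]
  | cons f fs ih =>
    simp only [pvPreGo, Bool.and_eq_true, beq_iff_eq, Bool.not_eq_eq_eq_not, Bool.not_true,
      List.isEmpty_eq_false_iff] at h
    obtain ⟨⟨h1, h2⟩, h3⟩ := h
    obtain ⟨j, hj, hdrop⟩ := pvSkipA_spec cs i h1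
    have hslice : ∀ n : Nat, PySem.List.slice cs (some (j : Int)) (some ((j : Int) + (n : Int))) =
        ((cs.drop i).dropWhile PySem.Chars.isspace).take n := by
      intro n
      have hc : (j : Int) + (n : Int) = ((j + n : Nat) : Int) := by push_cast; ring
      rw [hc, PySem.List.slice_natCast, Nat.add_sub_cancel_left, hdrop]
    have hlen : (if PySem.Chars.endswith f ['#','#'] then PySem.List.slice f none (some (-2))
        else if PySem.Chars.startswith f ['#','#'] then PySem.List.slice f (some 2) none
        else f).length =
        (if PySem.Chars.endswith f ['#','#'] then f.length - 2
        else if PySem.Chars.startswith f ['#','#'] then f.length - 2 else f.length) := by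
      split_ifs <;> simp [pvSlice_neg2, PySem.List.slice_from (a := 2) f (by norm_num)]
    rw [← hlen] at h3
    have hd : ((cs.drop i).dropWhile PySem.Chars.isspace).drop
        (if PySem.Chars.endswith f ['#','#'] then PySem.List.slice f none (some (-2))
        else if PySem.Chars.startswith f ['#','#'] then PySem.List.slice f (some 2) none
        else f).length = cs.drop (j + (if PySem.Chars.endswith f ['#','#'] then PySem.List.slice f none (some (-2))
        else if PySem.Chars.startswith f ['#','#'] then PySem.List.slice f (some 2) none
        else f).length) := by
      rw [← hdrop, List.drop_drop, Nat.add_comm]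
    have htail := ih (j + (if PySem.Chars.endswith f ['#','#'] then PySem.List.slice f none (some (-2))
        else if PySem.Chars.startswith f ['#','#'] then PySem.List.slice f (some 2) none
        else f).length) (by rw [← hd]; exact h3)
    simp only [pvLoopA, pvAlignB, List.map_cons, pvParseB, hj, PySem.Chars.lstrip, hslice]
    rw [htail, hd]

-- ===== VERDICT (by name: the statement is the Claim_ definition above) =====
theorem restore_feature_case_spec : Claim_equal_restore_feature_case := by
  intro features s _ hpre
  unfold Spec_restore_feature_case restore_feature_case restore_feature_case_alt
  have := pvLoop_eq (features.map String.toList) s.toList 0 (by simpa using hpre)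
  simp only [List.drop_zero, List.map_map] at this
  simp only [List.map_map]
  rw [this]
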